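-- pv_equiv track=rewrite | github.com/michael-horansky/battle-of-causality | class_Gamemaster.py | trim_empty_turns
-- ===== SOURCE A (Python) =====
-- def trim_empty_turns(dynamic_data, tail_element = {}):
--     # dynamic_data is a list of dictionaries
--     # This method trims empty dictionaries off of the list's tail
--     # and also performs a deepcopy on the rest.
--     tail_index = len(dynamic_data) - 1
--     trimmed_dynamic_data = []
--     end_of_tail = False
--     for i in range(tail_index, -1, -1):
--         if not end_of_tail and dynamic_data[i] == tail_element:
--             continue
--         else:
--             end_of_tail = True
--             trimmed_dynamic_data.insert(0, dynamic_data[i])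
--     return(trimmed_dynamic_data)
-- ===== SOURCE B (Python) =====
-- def trim_empty_turns(dynamic_data, tail_element = {}):
--     # Forward single pass: buffer runs of tail_element in `pending`; a later
--     # non-tail element flushes the buffer into `result`; trailing tail
--     # elements left in `pending` at the end are discarded.
--     pending = []
--     result = []
--     for x in dynamic_data:
--         if x == tail_element:
--             pending.append(x)
--         else:
--             result.extend(pending)
--             pending = []
--             result.append(x)
--     return result
-- ===== Notes on version B (the rewrite author's own statement) =====
-- stated objective: alternative
-- what changed: Replaced the backward index scan with an end-of-tail flag and insert(0, ...) by a single forward pass that buffers runs of tail elements in a pending list and flushes them when a later non-tail element appears, discarding the trailing buffer.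
import Mathlib
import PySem

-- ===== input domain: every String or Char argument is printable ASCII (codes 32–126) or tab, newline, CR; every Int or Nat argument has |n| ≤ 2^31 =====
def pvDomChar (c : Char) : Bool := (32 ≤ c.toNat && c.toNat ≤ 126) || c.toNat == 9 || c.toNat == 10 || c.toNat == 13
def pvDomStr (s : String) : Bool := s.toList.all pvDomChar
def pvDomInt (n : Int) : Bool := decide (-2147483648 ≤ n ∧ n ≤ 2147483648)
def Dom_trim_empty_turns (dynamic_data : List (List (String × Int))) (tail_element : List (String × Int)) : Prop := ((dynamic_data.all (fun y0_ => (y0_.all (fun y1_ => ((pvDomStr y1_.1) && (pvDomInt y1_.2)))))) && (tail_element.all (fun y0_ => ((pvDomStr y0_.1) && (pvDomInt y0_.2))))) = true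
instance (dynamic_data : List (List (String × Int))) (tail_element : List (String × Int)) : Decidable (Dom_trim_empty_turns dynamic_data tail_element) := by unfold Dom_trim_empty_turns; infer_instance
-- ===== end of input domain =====

-- B replaces A's backward scan (end-of-tail flag + insert(0, ...)) by a forward
-- pass with a pending buffer that is flushed at the next non-tail element; the return values are proved equal.

-- Python's `==` on dicts ignores insertion order: both sides' `x == tail_element`
-- is ported as equality of the dicts built from the pair lists (same key set,
-- same values; duplicate keys collapse exactly as Python's dict(...) does).
def pyDictEq (a b : List (String × Int)) : Bool :=
  let da := PySem.Dict.ofList a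
  let db := PySem.Dict.ofList b
  da.size == db.size && da.items.all (fun p => db.get? p.1 == some p.2)

-- ===== PORT A =====
-- loop body of A: state = (trimmed_dynamic_data, end_of_tail)
def stepA (tail_element : List (String × Int))
    (acc : List (List (String × Int)) × Bool) (x : List (String × Int)) :
    List (List (String × Int)) × Bool :=
  if !acc.2 && pyDictEq x tail_element then acc else (x :: acc.1, true)

def trim_empty_turns (dynamic_data : List (List (String × Int))) (tail_element : List (String × Int)) : List (List (String × Int)) :=
  ((PySem.List.pyRange ((dynamic_data.length : Int) - 1) (-1) (-1)).foldl
    (fun acc i => stepA tail_element acc (PySem.List.pyGetD dynamic_data i []))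
    ([], false)).1

-- ===== PORT B =====
-- loop body of B: state = (pending, result)
def stepB (tail_element : List (String × Int))
    (acc : List (List (String × Int)) × List (List (String × Int))) (x : List (String × Int)) :
    List (List (String × Int)) × List (List (String × Int)) :=
  if pyDictEq x tail_element then (acc.1 ++ [x], acc.2) else ([], acc.2 ++ acc.1 ++ [x])

def trim_empty_turns_alt (dynamic_data : List (List (String × Int))) (tail_element : List (String × Int)) : List (List (String × Int)) :=
  (dynamic_data.foldl (stepB tail_element) ([], [])).2

-- ===== PRECONDITION & SPEC =====
def Spec_trim_empty_turns (dynamic_data : List (List (String × Int))) (tail_element : List (String × Int)) (out : List (List (String × Int))) : Prop := out = trim_empty_turns_alt dynamic_data tail_element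
instance (dynamic_data : List (List (String × Int))) (tail_element : List (String × Int)) (out : List (List (String × Int))) : Decidable (Spec_trim_empty_turns dynamic_data tail_element out) := by unfold Spec_trim_empty_turns; infer_instance

-- ===== CLAIM (what is proved, stated in full; the proofs are below) =====
def Claim_equal_trim_empty_turns : Prop := ∀ (dynamic_data : List (List (String × Int))) (tail_element : List (String × Int)), Dom_trim_empty_turns dynamic_data tail_element → Spec_trim_empty_turns dynamic_data tail_element (trim_empty_turns dynamic_data tail_element)

-- ===== LEMMAS AND PROOFS =====

theorem stepA_true (tl : List (String × Int)) (t : List (List (String × Int)))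
    (x : List (String × Int)) : stepA tl (t, true) x = (x :: t, true) := by
  simp [stepA]

-- A-side fold with the end_of_tail flag already set: everything is prepended.
theorem foldA_true (tl : List (String × Int))
    (ys : List (List (String × Int))) (t : List (List (String × Int))) :
    (ys.foldl (stepA tl) (t, true)).1 = ys.reverse ++ t := by
  induction ys generalizing t with
  | nil => simp
  | cons y ys ih => rw [List.foldl_cons, stepA_true, ih]; simp

-- A-side fold from flag = false: drops the leading run of tail elements,
-- then prepends the rest.
theorem foldA_false (tl : List (String × Int))
    (ys : List (List (String × Int))) (t : List (List (String × Int))) :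
    (ys.foldl (stepA tl) (t, false)).1
      = (ys.dropWhile (fun x => pyDictEq x tl)).reverse ++ t := by
  induction ys generalizing t with
  | nil => simp
  | cons y ys ih =>
    by_cases h : pyDictEq y tl = true
    · rw [List.foldl_cons, show stepA tl (t, false) y = (t, false) by simp [stepA, h], ih]
      simp [h]
    · rw [List.foldl_cons, show stepA tl (t, false) y = (y :: t, true) by simp [stepA, h],
        foldA_true]
      simp [h]

-- B-side fold invariant, stated against "trim the trailing run of tail elements"
-- T ys = (ys.reverse.dropWhile eq).reverse.
theorem foldB_inv (tl : List (String × Int))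
    (xs p r : List (List (String × Int))) :
    (xs.foldl (stepB tl) (p, r)).2
      = if (xs.reverse.dropWhile (fun x => pyDictEq x tl)).reverse = [] then r
        else r ++ p ++ (xs.reverse.dropWhile (fun x => pyDictEq x tl)).reverse := by
  induction xs generalizing p r with
  | nil => simp
  | cons x xs ih =>
    have hsplit : List.dropWhile (fun y => pyDictEq y tl) (xs.reverse ++ [x])
        = if (List.dropWhile (fun y => pyDictEq y tl) xs.reverse).isEmpty then
            List.dropWhile (fun y => pyDictEq y tl) [x]
          else List.dropWhile (fun y => pyDictEq y tl) xs.reverse ++ [x] :=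
      List.dropWhile_append
    by_cases h : pyDictEq x tl = true
    · rw [List.foldl_cons, show stepB tl (p, r) x = (p ++ [x], r) by simp [stepB, h], ih]
      by_cases he : List.dropWhile (fun y => pyDictEq y tl) xs.reverse = []
      · simp [hsplit, he, h]
      · have h2 : List.dropWhile (fun y => pyDictEq y tl) (xs.reverse ++ [x])
            = List.dropWhile (fun y => pyDictEq y tl) xs.reverse ++ [x] := by
          rw [hsplit]; simp [List.isEmpty_iff, he]
        simp [h2, he]
    · rw [List.foldl_cons, show stepB tl (p, r) x = ([], r ++ p ++ [x]) by simp [stepB, h], ih]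
      by_cases he : List.dropWhile (fun y => pyDictEq y tl) xs.reverse = []
      · have h2 : List.dropWhile (fun y => pyDictEq y tl) (xs.reverse ++ [x]) = [x] := by
          rw [hsplit]; simp [he, h]
        simp [h2, he]
      · have h2 : List.dropWhile (fun y => pyDictEq y tl) (xs.reverse ++ [x])
            = List.dropWhile (fun y => pyDictEq y tl) xs.reverse ++ [x] := by
          rw [hsplit]; simp [List.isEmpty_iff, he]
        simp [h2, he]

-- The countdown index fold of A is the fold over the reversed list.
theorem foldA_eq_reverse_fold (dd : List (List (String × Int)))
    (f : (List (List (String × Int)) × Bool) → List (String × Int) → (List (List (String × Int)) × Bool))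
    (init : List (List (String × Int)) × Bool) :
    (PySem.List.pyRange ((dd.length : Int) - 1) (-1) (-1)).foldl
        (fun acc i => f acc (PySem.List.pyGetD dd i [])) init
      = dd.reverse.foldl f init := by
  rw [PySem.List.pyRange_neg_one_eq_reverse]
  have h1 : PySem.List.pyRange (-1 + 1) ((dd.length : Int) - 1 + 1) 1
      = PySem.List.pyRange 0 (dd.length : Int) 1 := by norm_num
  rw [h1, ← List.foldl_map, List.map_reverse]
  congr 1
  exact congrArg List.reverse (PySem.List.map_pyGetD_pyRange_zero dd ([] : List (String × Int)))

-- ===== VERDICT (by name: the statement is the Claim_ definition above) =====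
theorem trim_empty_turns_spec : Claim_equal_trim_empty_turns := by
  intro dd tail _
  show trim_empty_turns dd tail = trim_empty_turns_alt dd tail
  unfold trim_empty_turns trim_empty_turns_alt
  rw [foldA_eq_reverse_fold dd (stepA tail) ([], false),
    foldA_false tail dd.reverse [], foldB_inv tail dd [] []]
  by_cases he : dd.reverse.dropWhile (fun x => pyDictEq x tail) = [] <;> simp [he]
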